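-- pv_equiv track=rewrite | github.com/puhrez/algorithms | algos/prizes.py | max_prizes
-- ===== SOURCE A (Python) =====
-- def max_prizes(n):
--     summands = set()
--     a = 1
--     while n:
--         if n - a > a or n - a == 0:
--             summands.add(a)
--             n -= a
--         a += 1
--     return summands
-- ===== SOURCE B (Python) =====
-- def max_prizes(n):
--     # Binary search for the largest k with k*(k+1)//2 <= n, then the answer
--     # is {1, ..., k-1} plus one last summand k + r absorbing the remainder.
--     lo, hi = 0, 1
--     while hi * (hi + 1) // 2 <= n:
--         hi *= 2
--     while lo < hi:
--         mid = (lo + hi + 1) // 2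
--         if mid * (mid + 1) // 2 <= n:
--             lo = mid
--         else:
--             hi = mid - 1
--     k = lo
--     r = n - k * (k + 1) // 2
--     s = set(range(1, k))
--     if k:
--         s.add(k + r)
--     return s
-- ===== Notes on version B (the rewrite author's own statement) =====
-- stated objective: alternative
-- what changed: Replaces A's greedy subtraction loop, which builds the set element by element, with a closed form: binary-search the largest k whose triangular number is at most n, then return the range below k together with one last summand k plus the remainder.
import Mathlib
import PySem

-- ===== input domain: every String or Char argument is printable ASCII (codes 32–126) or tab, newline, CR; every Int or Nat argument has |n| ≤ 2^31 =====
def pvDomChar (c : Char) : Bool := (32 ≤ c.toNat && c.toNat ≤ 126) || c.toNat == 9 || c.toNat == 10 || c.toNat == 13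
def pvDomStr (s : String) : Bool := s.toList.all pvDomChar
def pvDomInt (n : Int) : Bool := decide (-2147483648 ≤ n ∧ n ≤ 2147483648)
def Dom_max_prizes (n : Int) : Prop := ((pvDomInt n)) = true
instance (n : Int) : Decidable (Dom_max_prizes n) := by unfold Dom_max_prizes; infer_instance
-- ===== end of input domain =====

-- B replaces A's greedy subtraction loop with a binary search for the largest k
-- with k(k+1)/2 ≤ n, returning {1,…,k-1} plus one last summand absorbing the remainder.


-- ===== PORT A =====
-- A's while loop; the Nat fuel is only a totality guard (for 0 ≤ n the loop
-- takes at most 2n+1 iterations, see pvLoopA_spec below).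
def pvLoopA (fuel : Nat) (n a : Int) (s : List Int) : List Int :=
  match fuel with
  | 0 => s
  | fuel + 1 =>
    if n ≠ 0 then
      if n - a > a ∨ n - a = 0 then pvLoopA fuel (n - a) (a + 1) (PySem.Set.add s a)
      else pvLoopA fuel n (a + 1) s
    else s

def max_prizes (n : Int) : List Int := pvLoopA (2 * n.toNat + 2) n 1 []

-- ===== PORT B =====
-- exponential growth of hi (the Nat fuel is only a totality guard: hi ≤ n while the loop runs)
def pvGrow (fuel : Nat) (n hi : Int) : Int :=
  match fuel with
  | 0 => hi
  | f + 1 =>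
    if PySem.Int.floordiv (hi * (hi + 1)) 2 ≤ n then pvGrow f n (2 * hi) else hi

-- binary search for the largest k with k(k+1)//2 ≤ n (the Nat fuel is only a totality guard)
def pvBS (fuel : Nat) (n lo hi : Int) : Int :=
  match fuel with
  | 0 => lo
  | f + 1 =>
    if lo < hi then
      let mid := PySem.Int.floordiv (lo + hi + 1) 2
      if PySem.Int.floordiv (mid * (mid + 1)) 2 ≤ n then pvBS f n mid hi
      else pvBS f n lo (mid - 1)
    else lo

def max_prizes_alt (n : Int) : List Int :=
  let hi := pvGrow (n.toNat + 2) n 1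
  let k := pvBS (hi.toNat + 1) n 0 hi
  let r := n - PySem.Int.floordiv (k * (k + 1)) 2
  let s := PySem.Set.ofList (PySem.List.pyRange 1 k 1)
  if k ≠ 0 then PySem.Set.add s (k + r) else s

-- ===== PRECONDITION & SPEC =====
-- A's while loop never terminates for n < 0 (a only grows and n never reaches 0),
-- so Pre_ admits exactly the inputs on which the Python A returns: 0 ≤ n.
def Pre_max_prizes (n : Int) : Prop := 0 ≤ n
instance (n : Int) : Decidable (Pre_max_prizes n) := by unfold Pre_max_prizes; infer_instance
def pvWitness_max_prizes : Int := (10)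

def Spec_max_prizes (n : Int) (out : List Int) : Prop := out = max_prizes_alt n
instance (n : Int) (out : List Int) : Decidable (Spec_max_prizes n out) := by unfold Spec_max_prizes; infer_instance

-- ===== CLAIM (what is proved, stated in full; the proofs are below) =====
def Claim_equal_max_prizes : Prop := ∀ (n : Int), Dom_max_prizes n → Pre_max_prizes n → Spec_max_prizes n (max_prizes n)

-- ===== LEMMAS AND PROOFS =====

-- the mathematical content of A's greedy loop from state (n, a)
def pvSpec (n a : Int) : List Int :=
  if h : a < 1 ∨ n ≤ 2 * a then [n]
  else a :: pvSpec (n - a) (a + 1)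
termination_by (2 * n - a).toNat
decreasing_by omega

lemma pvLoopA_zero (fuel : Nat) (a : Int) (s : List Int) : pvLoopA fuel 0 a s = s := by
  cases fuel <;> simp [pvLoopA]

lemma pvSet_add_not_mem {s : List Int} {a : Int} (h : a ∉ s) :
    PySem.Set.add s a = s ++ [a] := by
  simp [PySem.Set.add, PySem.Set.contains, h]

lemma pvSpec_base {n a : Int} (h : a < 1 ∨ n ≤ 2 * a) : pvSpec n a = [n] := by
  rw [pvSpec, dif_pos h]

lemma pvSpec_step {n a : Int} (h : ¬ (a < 1 ∨ n ≤ 2 * a)) :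
    pvSpec n a = a :: pvSpec (n - a) (a + 1) := by
  rw [pvSpec, dif_neg h]

-- A's loop appends the greedy list pvSpec n a to the set built so far
lemma pvLoopA_spec : ∀ (fuel : Nat) (n a : Int) (s : List Int),
    1 ≤ a → a ≤ n → (2 * n - a).toNat < fuel → (∀ x ∈ s, x < a) →
    pvLoopA fuel n a s = s ++ pvSpec n a := by
  intro fuel
  induction fuel with
  | zero => intro n a s _ _ hf _; omega
  | succ f ih =>
    intro n a s ha han hf hs
    have hne : n ≠ 0 := by omega
    have hnotmem : a ∉ s := fun hmem => absurd (hs a hmem) (by omega)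
    rw [pvLoopA]
    simp only [hne, ne_eq, not_false_eq_true, if_pos]
    by_cases hc : n - a > a ∨ n - a = 0
    · rw [if_pos hc]
      rcases hc with hgt | heq
      · -- n > 2a : take a and recurse
        rw [pvSpec_step (show ¬ (a < 1 ∨ n ≤ 2 * a) by omega)]
        rw [ih (n - a) (a + 1) (PySem.Set.add s a) (by omega) (by omega) (by omega)
            (by intro x hx
                rw [pvSet_add_not_mem hnotmem] at hx
                rcases List.mem_append.mp hx with h1 | h1
                · exact lt_trans (hs x h1) (by omega)
                · simp at h1; omega)]
        rw [pvSet_add_not_mem hnotmem]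
        simp
      · -- n = a : take a and stop
        rw [heq, pvLoopA_zero, pvSet_add_not_mem hnotmem, pvSpec_base (by omega)]
        have : n = a := by omega
        simp [this]
    · -- a < n ≤ 2a : skip a
      rw [if_neg hc]
      rw [ih n (a + 1) s (by omega) (by omega) (by omega)
          (fun x hx => lt_trans (hs x hx) (by omega))]
      rw [pvSpec_base (show (a:Int) < 1 ∨ n ≤ 2 * a by omega),
          pvSpec_base (show (a + 1 : Int) < 1 ∨ n ≤ 2 * (a + 1) by omega)]

-- floor division of the even product m(m+1) by 2 is exact
lemma pv_fd_tri (m : Int) : 2 * PySem.Int.floordiv (m * (m + 1)) 2 = m * (m + 1) := by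
  obtain ⟨c, hc⟩ := Int.even_mul_succ_self m
  rw [PySem.Int.floordiv_eq_ediv_of_pos (by norm_num)]
  omega

-- base situation of pvSpec_eq: n ≤ 2a forces k = a and s = a, answer [n]
lemma pvSpec_eq_base {n a k s : Int} (hb : a < 1 ∨ n ≤ 2 * a) (ha : 1 ≤ a) (hak : a ≤ k)
    (hsum : 2 * s = k * (k + 1) - (a - 1) * a) (hle : s ≤ n) :
    pvSpec n a = PySem.List.pyRange a k 1 ++ [k + (n - s)] := by
  have hn2a : n ≤ 2 * a := by omega
  have hk : k = a := by
    by_contra hne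
    have hk1 : a + 1 ≤ k := by omega
    have h2 : (a + 1) * (a + 2) ≤ k * (k + 1) := by nlinarith
    have h3 : (a + 1) * (a + 2) - (a - 1) * a = 4 * a + 2 := by ring
    omega
  rw [hk] at hsum ⊢
  have hsa : s = a := by
    have : (a : Int) * (a + 1) - (a - 1) * a = 2 * a := by ring
    omega
  rw [pvSpec_base hb, PySem.List.pyRange_one_eq_nil (le_refl a)]
  simp; omega

-- the greedy list from (n, a) in closed form: range a..k-1 then k + remainder,
-- where k is characterised by the triangular bracket carried in s
lemma pvSpec_eq : ∀ (N : Nat) (n a k s : Int), (2 * n - a).toNat ≤ N → 1 ≤ a → a ≤ k →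
    2 * s = k * (k + 1) - (a - 1) * a → s ≤ n → n < s + k + 1 →
    pvSpec n a = PySem.List.pyRange a k 1 ++ [k + (n - s)] := by
  intro N
  induction N with
  | zero =>
    intro n a k s hN ha hak hsum hle hlt
    exact pvSpec_eq_base (by omega) ha hak hsum hle
  | succ N ih =>
    intro n a k s hN ha hak hsum hle hlt
    by_cases hb : a < 1 ∨ n ≤ 2 * a
    · exact pvSpec_eq_base hb ha hak hsum hle
    · have hk1 : a + 1 ≤ k := by
        by_contra hne
        have hk : k = a := by omega
        rw [hk] at hsum hlt
        have : (a : Int) * (a + 1) - (a - 1) * a = 2 * a := by ring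
        omega
      rw [pvSpec_step hb,
          ih (n - a) (a + 1) k (s - a) (by omega) (by omega) (by omega)
            (by linear_combination hsum) (by omega) (by omega),
          PySem.List.pyRange_one_cons (by omega : a < k)]
      simp

-- pvGrow returns hi ≥ 1 with 2n < hi(hi+1)
lemma pvGrow_spec : ∀ (fuel : Nat) (n hi : Int), 1 ≤ hi → (n + 1 - hi).toNat < fuel →
    1 ≤ pvGrow fuel n hi ∧ 2 * n < pvGrow fuel n hi * (pvGrow fuel n hi + 1) := by
  intro fuel
  induction fuel with
  | zero => intro n hi _ hf; omega
  | succ f ih =>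
    intro n hi hhi hf
    rw [pvGrow]
    by_cases hc : PySem.Int.floordiv (hi * (hi + 1)) 2 ≤ n
    · rw [if_pos hc]
      have htri := pv_fd_tri hi
      have hle : hi * (hi + 1) ≤ 2 * n := by omega
      have hhn : hi ≤ n := by nlinarith
      exact ih n (2 * hi) (by omega) (by omega)
    · rw [if_neg hc]
      have htri := pv_fd_tri hi
      exact ⟨hhi, by omega⟩

-- pvBS returns the largest k with k(k+1) ≤ 2n, given the bracket [lo, hi]
lemma pvBS_spec : ∀ (fuel : Nat) (n lo hi : Int), 0 ≤ lo → lo ≤ hi →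
    lo * (lo + 1) ≤ 2 * n → 2 * n < (hi + 1) * (hi + 2) → (hi - lo).toNat < fuel →
    0 ≤ pvBS fuel n lo hi ∧ pvBS fuel n lo hi * (pvBS fuel n lo hi + 1) ≤ 2 * n ∧
      2 * n < (pvBS fuel n lo hi + 1) * (pvBS fuel n lo hi + 2) := by
  intro fuel
  induction fuel with
  | zero => intro n lo hi _ _ _ _ hf; omega
  | succ f ih =>
    intro n lo hi hlo hlh hlow hup hf
    rw [pvBS]
    by_cases hlt : lo < hi
    · rw [if_pos hlt]
      have hmid : lo < PySem.Int.floordiv (lo + hi + 1) 2 ∧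
          PySem.Int.floordiv (lo + hi + 1) 2 ≤ hi := by
        rw [PySem.Int.floordiv_eq_ediv_of_pos (by norm_num)]
        omega
      set mid := PySem.Int.floordiv (lo + hi + 1) 2 with hmiddef
      have htri := pv_fd_tri mid
      by_cases hc : PySem.Int.floordiv (mid * (mid + 1)) 2 ≤ n
      · rw [if_pos hc]
        exact ih n mid hi (by omega) (by omega) (by omega) hup (by omega)
      · rw [if_neg hc]
        have hupper : 2 * n < (mid - 1 + 1) * (mid - 1 + 2) := by
          have : 2 * n < mid * (mid + 1) := by omega
          nlinarith
        exact ih n lo (mid - 1) hlo (by omega) hlow hupper (by omega)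
    · rw [if_neg hlt]
      have hEq : lo = hi := by omega
      subst hEq
      exact ⟨hlo, by omega, by nlinarith⟩

-- a Nodup list (here a range) is its own set
lemma pvSet_ofList_pyRange (a b : Int) :
    PySem.Set.ofList (PySem.List.pyRange a b 1) = PySem.List.pyRange a b 1 := by
  have hnd := PySem.List.nodup_pyRange_one (a := a) (b := b)
  rw [PySem.Set.ofList_eq_foldl]
  generalize PySem.List.pyRange a b 1 = l at hnd ⊢
  induction l using List.reverseRecOn with
  | nil => rfl
  | append_singleton xs x ihx =>
    rw [List.foldl_append, List.foldl_cons, List.foldl_nil]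
    have hnx : xs.Nodup := (List.nodup_append.mp hnd).1
    have hxmem : x ∉ xs := by
      have h2 : xs.Nodup ∧ ∀ a ∈ xs, ¬ a = x := by
        simpa [List.nodup_append] using hnd
      exact fun hmem => h2.2 x hmem rfl
    rw [ihx hnx, pvSet_add_not_mem hxmem]

-- ===== VERDICT (by name: the statement is the Claim_ definition above) =====
theorem max_prizes_spec : Claim_equal_max_prizes := by
  intro n _ hpre
  unfold Spec_max_prizes
  have hpre' : (0:Int) ≤ n := hpre
  by_cases hz : n = 0
  · subst hz; decide
  · have hn1 : (1:Int) ≤ n := by omega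
    have hA : max_prizes n = pvSpec n 1 := by
      unfold max_prizes
      rw [pvLoopA_spec (2 * n.toNat + 2) n 1 [] (by omega) hn1 (by omega) (by simp)]
      simp
    simp only [max_prizes_alt]
    obtain ⟨hhi1, hhi2⟩ := pvGrow_spec (n.toNat + 2) n 1 (by omega) (by omega)
    set hi := pvGrow (n.toNat + 2) n 1 with hhidef
    obtain ⟨hk0, hklow, hkup⟩ := pvBS_spec (hi.toNat + 1) n 0 hi (by omega) (by omega)
      (by omega) (by nlinarith) (by omega)
    set k := pvBS (hi.toNat + 1) n 0 hi with hkdef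
    have htri := pv_fd_tri k
    set s := PySem.Int.floordiv (k * (k + 1)) 2 with hsdef
    have hk1 : (1:Int) ≤ k := by nlinarith
    have hsn : s ≤ n := by omega
    have hnlt : n < s + k + 1 := by nlinarith
    have hkne : k ≠ 0 := by omega
    simp only [hkne, ne_eq, not_false_eq_true, if_pos]
    rw [hA, pvSpec_eq (2 * n - 1).toNat n 1 k s (by omega) (le_refl 1) hk1
        (by linear_combination htri) hsn hnlt]
    rw [pvSet_ofList_pyRange]
    rw [pvSet_add_not_mem (by
      rw [PySem.List.mem_pyRange_one]
      omega)]
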